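-- pv_equiv track=rewrite | github.com/Empreiteiro/langflow-factory | components/gcp/enchanced_big_text_input.py | update_build_config
-- ===== SOURCE A (Python) =====
-- def update_build_config(build_config, field_value, field_name=None):
--     if field_name != "action":
--         return build_config
--
--     # Extract action name from the selected action
--     selected = [action["name"] for action in field_value] if isinstance(field_value, list) else []
--
--     field_map = {
--         "Query": ["query", "clean_query", "auto_escape_tables"],
--         "List Datasets": [],
--         "List Tables": ["table_reference"],
--         "Insert Data": ["table_reference", "data_to_insert"],
--         "Update Rows": ["table_reference", "update_condition", "description_value"],
--         "Create Dataset": ["table_reference", "dataset_description", "dataset_location"],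
--         "Create Table": ["table_reference", "table_schema"],
--         "Delete Table": ["table_reference"],
--         "Get Table Schema": ["table_reference"],
--     }
--
--     # Hide all dynamic fields first
--     for field_name in ["query", "clean_query", "auto_escape_tables", "table_reference", "data_to_insert",
--                       "table_schema", "dataset_description", "dataset_location", "update_condition", "description_value"]:
--         if field_name in build_config:
--             build_config[field_name]["show"] = False
--
--     # Show fields based on selected action
--     if len(selected) == 1 and selected[0] in field_map:
--         for field_name in field_map[selected[0]]:
--             if field_name in build_config:
--                 build_config[field_name]["show"] = True
--
--     return build_config
-- ===== SOURCE B (Python) =====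
-- _DYNAMIC_FIELDS = ["query", "clean_query", "auto_escape_tables", "table_reference", "data_to_insert",
--                    "table_schema", "dataset_description", "dataset_location", "update_condition", "description_value"]
--
-- _FIELD_MAP = {
--     "Query": ["query", "clean_query", "auto_escape_tables"],
--     "List Datasets": [],
--     "List Tables": ["table_reference"],
--     "Insert Data": ["table_reference", "data_to_insert"],
--     "Update Rows": ["table_reference", "update_condition", "description_value"],
--     "Create Dataset": ["table_reference", "dataset_description", "dataset_location"],
--     "Create Table": ["table_reference", "table_schema"],
--     "Delete Table": ["table_reference"],
--     "Get Table Schema": ["table_reference"],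
-- }
--
--
-- def update_build_config(build_config, field_value, field_name=None):
--     if field_name != "action":
--         return build_config
--
--     selected = [action["name"] for action in field_value] if isinstance(field_value, list) else []
--
--     if len(selected) == 1:
--         visible = _FIELD_MAP.get(selected[0], [])
--     else:
--         visible = []
--
--     # Traverse the config itself (not the field list): each dynamic entry of
--     # build_config decides its own flag from the precomputed visible list.
--     for key, cfg in build_config.items():
--         if key in _DYNAMIC_FIELDS:
--             cfg["show"] = key in visible
--
--     return build_config
-- ===== Notes on version B (the rewrite author's own statement) =====
-- stated objective: alternative
-- what changed: Inverts the traversal: instead of A's two keyed-update loops over the fixed field lists (hide all, then re-show), B precomputes the visible list and makes one pass over build_config's own entries, each entry setting its own flag.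
import Mathlib
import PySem

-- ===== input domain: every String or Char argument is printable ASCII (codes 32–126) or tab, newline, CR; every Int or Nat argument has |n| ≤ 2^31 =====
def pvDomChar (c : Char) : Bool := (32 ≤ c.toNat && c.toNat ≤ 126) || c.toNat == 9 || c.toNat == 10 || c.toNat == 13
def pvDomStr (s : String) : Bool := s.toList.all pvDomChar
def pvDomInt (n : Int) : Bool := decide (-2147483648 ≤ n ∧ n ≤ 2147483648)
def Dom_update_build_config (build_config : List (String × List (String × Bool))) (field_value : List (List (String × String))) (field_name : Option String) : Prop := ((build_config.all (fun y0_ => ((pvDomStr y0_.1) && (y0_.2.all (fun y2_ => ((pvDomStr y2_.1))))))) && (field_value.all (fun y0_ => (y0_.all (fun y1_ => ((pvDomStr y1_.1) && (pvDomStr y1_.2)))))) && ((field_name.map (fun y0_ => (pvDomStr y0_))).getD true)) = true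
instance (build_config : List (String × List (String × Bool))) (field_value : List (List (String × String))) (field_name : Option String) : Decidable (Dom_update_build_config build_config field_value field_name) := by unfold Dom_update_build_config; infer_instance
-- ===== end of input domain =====

-- B inverts A's traversal: instead of two keyed-update loops over the fixed field lists
-- (hide all, then re-show the selected action's fields), B precomputes the visible list and
-- makes one pass over build_config's own entries, each entry setting its own flag. Both the
-- Python A and the Python B mutate build_config in place; the equivalence proved here is
-- about the return value.

-- ===== PORT A =====
-- Transliteration helpers for the Python statement `build_config[f]["show"] = b`
-- (A's keyed update into the dict; pvSetShow is also B's per-entry inner assignment).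
-- inner["show"] = b : overwrite the first "show" entry in place, else append (exact Python dict assignment)
def pvSetShow : List (String × Bool) → Bool → List (String × Bool)
  | [], b => [("show", b)]
  | (k, v) :: rest, b => if k = "show" then ("show", b) :: rest else (k, v) :: pvSetShow rest b

-- build_config[f]["show"] = b for f present: update the first entry keyed f, keeping its position
def pvModifyShow : List (String × List (String × Bool)) → String → Bool → List (String × List (String × Bool))
  | [], _, _ => []
  | (k, inner) :: rest, f, b =>
      if k = f then (k, pvSetShow inner b) :: rest else (k, inner) :: pvModifyShow rest f b

-- `f in build_config`
def pvContains (bc : List (String × List (String × Bool))) (f : String) : Bool :=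
  bc.any (fun p => p.1 = f)

-- the guarded statement `if f in build_config: build_config[f]["show"] = b`
def pvUpdShow (bc : List (String × List (String × Bool))) (f : String) (b : Bool) : List (String × List (String × Bool)) :=
  if pvContains bc f then pvModifyShow bc f b else bc

def pvFieldMap : List (String × List String) :=
  [("Query", ["query", "clean_query", "auto_escape_tables"]),
   ("List Datasets", []),
   ("List Tables", ["table_reference"]),
   ("Insert Data", ["table_reference", "data_to_insert"]),
   ("Update Rows", ["table_reference", "update_condition", "description_value"]),
   ("Create Dataset", ["table_reference", "dataset_description", "dataset_location"]),
   ("Create Table", ["table_reference", "table_schema"]),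
   ("Delete Table", ["table_reference"]),
   ("Get Table Schema", ["table_reference"])]

def pvDynamicFields : List String :=
  ["query", "clean_query", "auto_escape_tables", "table_reference", "data_to_insert",
   "table_schema", "dataset_description", "dataset_location", "update_condition", "description_value"]

def update_build_config (build_config : List (String × List (String × Bool))) (field_value : List (List (String × String))) (field_name : Option String) : List (String × List (String × Bool)) :=
  if field_name ≠ some "action" then build_config
  else
    -- selected = [action["name"] for action in field_value]; a missing "name" is a KeyError
    -- (mapM = none), excluded by Pre_; returning build_config there is an arbitrary totalizer.
    (field_value.mapM (fun (action : List (String × String)) => action.lookup "name")).elim build_config (fun selected =>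
      -- hide all dynamic fields first
      let bc1 := pvDynamicFields.foldl (fun acc f => pvUpdShow acc f false) build_config
      -- show fields based on selected action
      if selected.length = 1 then
        (pvFieldMap.lookup selected.headI).elim bc1
          (fun fs => fs.foldl (fun acc f => pvUpdShow acc f true) bc1)
      else bc1)

-- ===== PORT B =====
-- visible = _FIELD_MAP.get(selected[0], []) if len(selected) == 1 else []
def pvVisibleFields (selected : List String) : List String :=
  if selected.length = 1 then (pvFieldMap.lookup selected.headI).getD [] else []

def update_build_config_alt (build_config : List (String × List (String × Bool))) (field_value : List (List (String × String))) (field_name : Option String) : List (String × List (String × Bool)) :=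
  if field_name ≠ some "action" then build_config
  else
    (field_value.mapM (fun (action : List (String × String)) => action.lookup "name")).elim build_config (fun selected =>
      let visible := pvVisibleFields selected
      -- one pass over build_config's own entries: each dynamic entry sets its own flag
      build_config.map (fun p =>
        if pvDynamicFields.contains p.1 then (p.1, pvSetShow p.2 (visible.contains p.1)) else p))

-- ===== PRECONDITION & SPEC =====
-- Pre_ excludes (a) exactly the inputs where the Python A raises KeyError (field_name == "action"
-- and some element of field_value has no "name" key), and (b) build_config lists with duplicate
-- top-level keys, unrepresentable as a Python dict, on which first-match-vs-every-entry update
-- order is accidental.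
def Pre_update_build_config (build_config : List (String × List (String × Bool))) (field_value : List (List (String × String))) (field_name : Option String) : Prop :=
  (build_config.map Prod.fst).Nodup ∧
  (field_name = some "action" → ∀ d ∈ field_value, (d.lookup "name").isSome = true)
instance (build_config : List (String × List (String × Bool))) (field_value : List (List (String × String))) (field_name : Option String) : Decidable (Pre_update_build_config build_config field_value field_name) := by unfold Pre_update_build_config; infer_instance

def pvWitness_update_build_config : (List (String × List (String × Bool))) × (List (List (String × String))) × Option String :=
  ([("query", [("show", false)]), ("table_reference", [("show", true)])], [[("name", "Query")]], some "action")

def Spec_update_build_config (build_config : List (String × List (String × Bool))) (field_value : List (List (String × String))) (field_name : Option String) (out : List (String × List (String × Bool))) : Prop := out = update_build_config_alt build_config field_value field_name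
instance (build_config : List (String × List (String × Bool))) (field_value : List (List (String × String))) (field_name : Option String) (out : List (String × List (String × Bool))) : Decidable (Spec_update_build_config build_config field_value field_name out) := by unfold Spec_update_build_config; infer_instance

-- ===== CLAIM (what is proved, stated in full; the proofs are below) =====
def Claim_equal_update_build_config : Prop := ∀ (build_config : List (String × List (String × Bool))) (field_value : List (List (String × String))) (field_name : Option String), Dom_update_build_config build_config field_value field_name → Pre_update_build_config build_config field_value field_name → Spec_update_build_config build_config field_value field_name (update_build_config build_config field_value field_name)

-- ===== LEMMAS AND PROOFS =====

-- per-entry form of A's keyed update (the function B's map applies for one field)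
def pvEntryUpd (f : String) (b : Bool) (p : String × List (String × Bool)) : String × List (String × Bool) :=
  if p.1 = f then (p.1, pvSetShow p.2 b) else p

theorem pvContains_modify (bc : List (String × List (String × Bool))) (f g : String) (b : Bool) :
    pvContains (pvModifyShow bc f b) g = pvContains bc g := by
  induction bc with
  | nil => rfl
  | cons p rest ih =>
    obtain ⟨k, inner⟩ := p
    simp only [pvContains] at ih
    by_cases h : k = f <;> simp [pvModifyShow, pvContains, h, ih]

theorem pvSetShow_setShow (d : List (String × Bool)) (b c : Bool) :
    pvSetShow (pvSetShow d b) c = pvSetShow d c := by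
  induction d with
  | nil => simp [pvSetShow]
  | cons p rest ih =>
    obtain ⟨k, v⟩ := p
    by_cases h : k = "show" <;> simp [pvSetShow, h, ih]

theorem pvModify_modify_self (bc : List (String × List (String × Bool))) (f : String) (b c : Bool) :
    pvModifyShow (pvModifyShow bc f b) f c = pvModifyShow bc f c := by
  induction bc with
  | nil => rfl
  | cons p rest ih =>
    obtain ⟨k, inner⟩ := p
    by_cases h : k = f <;> simp [pvModifyShow, h, ih, pvSetShow_setShow]

theorem pvModify_comm (bc : List (String × List (String × Bool))) (f g : String) (b c : Bool) (h : f ≠ g) :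
    pvModifyShow (pvModifyShow bc f b) g c = pvModifyShow (pvModifyShow bc g c) f b := by
  induction bc with
  | nil => rfl
  | cons p rest ih =>
    obtain ⟨k, inner⟩ := p
    by_cases hf : k = f
    · have hg : ¬ k = g := fun e => h (hf ▸ e ▸ rfl)
      simp [pvModifyShow, hf, hg, h, Ne.symm h]
    · by_cases hg : k = g <;> simp [pvModifyShow, hf, hg, h, Ne.symm h, ih]

theorem pvUpd_absorb (bc : List (String × List (String × Bool))) (f : String) (b c : Bool) :
    pvUpdShow (pvUpdShow bc f b) f c = pvUpdShow bc f c := by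
  unfold pvUpdShow
  by_cases h : pvContains bc f = true
  · simp [h, pvContains_modify, pvModify_modify_self]
  · simp [h]

theorem pvUpd_comm (bc : List (String × List (String × Bool))) (f g : String) (b c : Bool) (h : f ≠ g) :
    pvUpdShow (pvUpdShow bc f b) g c = pvUpdShow (pvUpdShow bc g c) f b := by
  unfold pvUpdShow
  by_cases hf : pvContains bc f = true <;> by_cases hg : pvContains bc g = true <;>
    simp [hf, hg, pvContains_modify, pvModify_comm bc f g b c h]

theorem pvUpd_foldl (l : List String) (β : String → Bool) (t : String) (b : Bool)
    (bc : List (String × List (String × Bool))) (ht : t ∉ l) :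
    pvUpdShow (l.foldl (fun a f => pvUpdShow a f (β f)) bc) t b
      = l.foldl (fun a f => pvUpdShow a f (β f)) (pvUpdShow bc t b) := by
  induction l generalizing bc with
  | nil => rfl
  | cons x xs ih =>
    have hx : t ≠ x := fun e => ht (e ▸ List.mem_cons_self)
    simp only [List.foldl_cons]
    rw [ih _ (fun hm => ht (List.mem_cons_of_mem _ hm)),
        pvUpd_comm bc x t (β x) b (Ne.symm hx)]

-- once `upd t true` has been applied, later occurrences of t in a show-loop are redundant
theorem pvDropDup (fs : List String) (t : String) (X : List (String × List (String × Bool))) :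
    fs.foldl (fun a f => pvUpdShow a f true) (pvUpdShow X t true)
      = (fs.filter (fun f => f != t)).foldl (fun a f => pvUpdShow a f true) (pvUpdShow X t true) := by
  induction fs generalizing X with
  | nil => rfl
  | cons f rest ih =>
    by_cases h : f = t
    · subst h
      have hfil : List.filter (fun g => g != f) (f :: rest) = List.filter (fun g => g != f) rest := by
        simp
      rw [hfil, List.foldl_cons, pvUpd_absorb, ih]
    · have hfil : List.filter (fun g => g != t) (f :: rest)
          = f :: List.filter (fun g => g != t) rest := by simp [h]
      rw [hfil, List.foldl_cons, List.foldl_cons,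
          pvUpd_comm X t f true true (fun e => h e.symm)]
      exact ih (pvUpdShow X f true)

-- pull one occurrence of t ∈ fs to the front of the show-loop
theorem pvPullFront (fs : List String) (t : String) (X : List (String × List (String × Bool)))
    (ht : t ∈ fs) :
    fs.foldl (fun a f => pvUpdShow a f true) X
      = (fs.filter (fun f => f != t)).foldl (fun a f => pvUpdShow a f true) (pvUpdShow X t true) := by
  induction fs generalizing X with
  | nil => cases ht
  | cons f rest ih =>
    by_cases h : f = t
    · subst h
      have hfil : List.filter (fun g => g != f) (f :: rest) = List.filter (fun g => g != f) rest := by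
        simp
      rw [hfil, List.foldl_cons]
      exact pvDropDup rest f X
    · have hr : t ∈ rest := by
        rcases List.mem_cons.mp ht with e | hr
        · exact absurd e.symm h
        · exact hr
      have hfil : List.filter (fun g => g != t) (f :: rest)
          = f :: List.filter (fun g => g != t) rest := by simp [h]
      rw [hfil, List.foldl_cons, List.foldl_cons, ih _ hr,
          pvUpd_comm X f t true true h]

-- under Pre_, every action has a "name", so the selected-names extraction succeeds
theorem pvMapM_isSome (l : List (List (String × String)))
    (h : ∀ d ∈ l, (List.lookup "name" d).isSome = true) :
    (l.mapM (fun (action : List (String × String)) => action.lookup "name")).isSome = true := by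
  induction l with
  | nil => rfl
  | cons d rest ih =>
    have hd := h d List.mem_cons_self
    rw [List.mapM_cons]
    cases hl : List.lookup "name" d with
    | none => rw [hl] at hd; simp at hd
    | some v =>
      have hr := ih (fun x hx => h x (List.mem_cons_of_mem _ hx))
      cases hm : rest.mapM (fun (action : List (String × String)) => action.lookup "name") with
      | none => rw [hm] at hr; simp at hr
      | some vs => simp

-- STAGE 1: hide-all then show-fs  =  one fold assigning membership, for fs ⊆ ten, ten nodup
theorem pvMain (ten : List String) (hnd : ten.Nodup) (fs : List String)
    (bc : List (String × List (String × Bool))) (hsub : ∀ f ∈ fs, f ∈ ten) :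
    fs.foldl (fun a f => pvUpdShow a f true) (ten.foldl (fun a f => pvUpdShow a f false) bc)
      = ten.foldl (fun a f => pvUpdShow a f (fs.contains f)) bc := by
  induction ten generalizing fs bc with
  | nil =>
    have : fs = [] := List.eq_nil_iff_forall_not_mem.mpr (fun x hx => by simpa using hsub x hx)
    subst this; rfl
  | cons t rest ih =>
    have hnr : t ∉ rest := (List.nodup_cons.mp hnd).1
    have hndr : rest.Nodup := (List.nodup_cons.mp hnd).2
    simp only [List.foldl_cons]
    by_cases ht : t ∈ fs
    · have hct : fs.contains t = true := List.contains_iff_mem.mpr ht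
      rw [hct, pvPullFront fs t _ ht,
          pvUpd_foldl rest (fun _ => false) t true _ hnr, pvUpd_absorb]
      have hsub' : ∀ f ∈ fs.filter (fun g => g != t), f ∈ rest := by
        intro f hf
        have hm := List.mem_filter.mp hf
        have hne : f ≠ t := by simpa using hm.2
        rcases List.mem_cons.mp (hsub f hm.1) with e | hr
        · exact absurd e hne
        · exact hr
      rw [ih hndr _ _ hsub']
      apply PySem.List.foldl_congr_mem
      intro a f hf
      have hfne : f ≠ t := fun e => hnr (e ▸ hf)
      have hcf : (fs.filter (fun g => g != t)).contains f = fs.contains f := by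
        by_cases hm : f ∈ fs
        · simp [List.mem_filter, hm, hfne]
        · simp [List.mem_filter, hm]
      rw [hcf]
    · have hct : fs.contains t = false := by
        simp [ht]
      rw [hct]
      exact ih hndr fs (pvUpdShow bc t false)
        (fun f hf => by
          rcases List.mem_cons.mp (hsub f hf) with e | hr
          · exact absurd (e ▸ hf) ht
          · exact hr)

theorem pvLookupSub (m : List (String × List String)) (s : String) (fs : List String)
    (hall : ∀ p ∈ m, ∀ f ∈ p.2, f ∈ pvDynamicFields) (h : m.lookup s = some fs) :
    ∀ f ∈ fs, f ∈ pvDynamicFields := by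
  induction m with
  | nil => simp [List.lookup] at h
  | cons p rest ih =>
    obtain ⟨k, v⟩ := p
    by_cases hk : k = s
    · subst hk
      simp [List.lookup] at h
      exact h ▸ hall (k, v) List.mem_cons_self
    · have hne : (s == k) = false := beq_eq_false_iff_ne.mpr (fun e => hk e.symm)
      simp [List.lookup, hne] at h
      exact ih (fun q hq => hall q (List.mem_cons_of_mem _ hq)) h

set_option maxRecDepth 4000 in
theorem pvNodupDyn : pvDynamicFields.Nodup := by decide

theorem pvMapSub : ∀ p ∈ pvFieldMap, ∀ f ∈ p.2, f ∈ pvDynamicFields := by decide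

-- entry-map with a key absent from the list is the identity
theorem pvMapEntry_id (bc : List (String × List (String × Bool))) (f : String) (b : Bool)
    (hf : f ∉ bc.map Prod.fst) : bc.map (pvEntryUpd f b) = bc := by
  induction bc with
  | nil => rfl
  | cons p rest ih =>
    have hp : p.1 ≠ f := fun e => hf (by simp [e])
    rw [List.map_cons, ih (fun hm => hf (List.mem_cons_of_mem _ hm))]
    simp [pvEntryUpd, hp]

-- entry-maps preserve the key list
theorem pvMapEntry_keys (bc : List (String × List (String × Bool))) (f : String) (b : Bool) :
    (bc.map (pvEntryUpd f b)).map Prod.fst = bc.map Prod.fst := by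
  rw [List.map_map]
  apply List.map_congr_left
  intro p _
  by_cases h : p.1 = f <;> simp [pvEntryUpd, h]

-- STAGE 2a: with unique keys, A's keyed first-match update equals a map over every entry
theorem pvModify_eq_map (bc : List (String × List (String × Bool))) (f : String) (b : Bool)
    (hnd : (bc.map Prod.fst).Nodup) : pvModifyShow bc f b = bc.map (pvEntryUpd f b) := by
  induction bc with
  | nil => rfl
  | cons p rest ih =>
    obtain ⟨k, inner⟩ := p
    rw [List.map_cons] at hnd
    have h1 : k ∉ rest.map Prod.fst := (List.nodup_cons.mp hnd).1
    have h2 : (rest.map Prod.fst).Nodup := (List.nodup_cons.mp hnd).2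
    by_cases h : k = f
    · subst h
      simp only [pvModifyShow, if_pos rfl, List.map_cons]
      rw [pvMapEntry_id rest k b h1]
      simp [pvEntryUpd]
    · simp only [pvModifyShow, if_neg h, List.map_cons]
      rw [ih h2]
      simp [pvEntryUpd, h]

theorem pvUpd_eq_map (bc : List (String × List (String × Bool))) (f : String) (b : Bool)
    (hnd : (bc.map Prod.fst).Nodup) : pvUpdShow bc f b = bc.map (pvEntryUpd f b) := by
  unfold pvUpdShow
  by_cases hc : pvContains bc f = true
  · rw [if_pos hc]
    exact pvModify_eq_map bc f b hnd
  · rw [if_neg hc]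
    have hf : f ∉ bc.map Prod.fst := by
      intro hm
      apply hc
      rcases List.mem_map.mp hm with ⟨p, hp, he⟩
      unfold pvContains
      rw [List.any_eq_true]
      exact ⟨p, hp, by simp [he]⟩
    exact (pvMapEntry_id bc f b hf).symm

-- STAGE 2b: a fold of keyed updates over a nodup field list, on a nodup-keyed config,
-- is one map over the config entries
theorem pvFoldMap (ten : List String) (β : String → Bool)
    (bc : List (String × List (String × Bool))) (hten : ten.Nodup)
    (hbc : (bc.map Prod.fst).Nodup) :
    ten.foldl (fun a f => pvUpdShow a f (β f)) bc
      = bc.map (fun p => if ten.contains p.1 then (p.1, pvSetShow p.2 (β p.1)) else p) := by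
  induction ten generalizing bc with
  | nil =>
    simp
  | cons t rest ih =>
    have hnr : t ∉ rest := (List.nodup_cons.mp hten).1
    have hndr : rest.Nodup := (List.nodup_cons.mp hten).2
    simp only [List.foldl_cons]
    rw [pvUpd_eq_map bc t (β t) hbc,
        ih (bc.map (pvEntryUpd t (β t))) hndr (by rw [pvMapEntry_keys]; exact hbc),
        List.map_map]
    apply List.map_congr_left
    intro p _
    obtain ⟨k, inner⟩ := p
    by_cases h : k = t
    · subst h
      simp [pvEntryUpd, hnr]
    · simp [pvEntryUpd, h]

-- ===== VERDICT (by name: the statement is the Claim_ definition above) =====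
theorem update_build_config_spec : Claim_equal_update_build_config := by
  intro build_config field_value field_name _ hpre
  obtain ⟨hnd, hname⟩ := hpre
  unfold Spec_update_build_config update_build_config update_build_config_alt
  by_cases hfn : field_name = some "action"
  · simp only [hfn, ne_eq, not_true_eq_false, if_false]
    cases hm : field_value.mapM (fun (action : List (String × String)) => action.lookup "name") with
    | none =>
      -- impossible under Pre_: every action dict carries a "name" key
      exact absurd (pvMapM_isSome field_value (hname hfn)) (by simp [hm])
    | some selected =>
      simp only [Option.elim_some]
      by_cases hlen : selected.length = 1
      · simp only [hlen, if_pos]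
        cases hl : pvFieldMap.lookup selected.headI with
        | none =>
          simp only [Option.elim_none]
          rw [pvFoldMap pvDynamicFields (fun _ => false) build_config pvNodupDyn hnd]
          apply List.map_congr_left
          intro p _
          simp [pvVisibleFields, hlen, hl]
        | some fs =>
          simp only [Option.elim_some]
          rw [pvMain pvDynamicFields pvNodupDyn fs build_config
                (pvLookupSub pvFieldMap selected.headI fs pvMapSub hl),
              pvFoldMap pvDynamicFields (fun f => fs.contains f) build_config pvNodupDyn hnd]
          apply List.map_congr_left
          intro p _
          simp [pvVisibleFields, hlen, hl]
      · simp only [hlen, if_false]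
        rw [pvFoldMap pvDynamicFields (fun _ => false) build_config pvNodupDyn hnd]
        apply List.map_congr_left
        intro p _
        simp [pvVisibleFields, hlen]
  · simp [hfn]
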